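-- pv_equiv track=rewrite | github.com/Benjaminr180/IA25_P2 | Enfoque_3/091_Inferencia_Lógica_Proposicional.py | evaluar_bc
-- ===== SOURCE A (Python) =====
-- def evaluar_bc(bc, proposicion):
--     hechos = set()
--     for regla in bc:
--         if "=>" not in regla:
--             hechos.add(regla)
--
--     cambiando = True
--     while cambiando:
--         cambiando = False
--         for regla in bc:
--             if "=>" in regla:
--                 antecedente, consecuente = regla.split("=>")
--                 antecedente = antecedente.strip()
--                 consecuente = consecuente.strip()
--                 if antecedente in hechos and consecuente not in hechos:
--                     hechos.add(consecuente)
--                     cambiando = True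
--
--     return proposicion in hechos
-- ===== SOURCE B (Python) =====
-- def evaluar_bc(bc, proposicion):
--     # One pass: split facts from rules, index rules by antecedent; then DFS reachability.
--     adj = {}
--     alcanzados = set()
--     pila = []
--     for regla in bc:
--         if "=>" in regla:
--             antecedente, consecuente = regla.split("=>")
--             adj.setdefault(antecedente.strip(), []).append(consecuente.strip())
--         elif regla not in alcanzados:
--             alcanzados.add(regla)
--             pila.append(regla)
--     while pila:
--         x = pila.pop()
--         for y in adj.get(x, []):
--             if y not in alcanzados:
--                 alcanzados.add(y)
--                 pila.append(y)
--     return proposicion in alcanzados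
-- ===== Notes on version B (the rewrite author's own statement) =====
-- stated objective: alternative
-- what changed: A repeatedly re-scans and re-splits the whole rule base until a full pass adds no new fact; B makes one pass that separates facts from rules and indexes rules in an antecedent->consequents dict, then runs a worklist (DFS) reachability sweep from the initial facts, so each rule is split once and fired at most once.
import Mathlib
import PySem

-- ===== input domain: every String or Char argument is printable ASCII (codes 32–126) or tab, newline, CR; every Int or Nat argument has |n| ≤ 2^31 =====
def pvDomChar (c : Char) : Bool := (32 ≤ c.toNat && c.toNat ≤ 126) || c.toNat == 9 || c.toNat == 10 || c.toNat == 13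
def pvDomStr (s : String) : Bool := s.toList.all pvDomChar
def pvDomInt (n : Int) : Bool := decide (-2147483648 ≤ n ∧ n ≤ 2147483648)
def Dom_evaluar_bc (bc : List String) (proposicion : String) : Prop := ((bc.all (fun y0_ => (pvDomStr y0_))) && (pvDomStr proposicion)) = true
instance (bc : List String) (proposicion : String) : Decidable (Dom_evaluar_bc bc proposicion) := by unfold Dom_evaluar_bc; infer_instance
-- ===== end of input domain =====

-- B replaces A's repeated full passes over the rule base by a one-pass antecedent→consequents
-- index plus a worklist (DFS) reachability sweep from the initial facts, so each rule is
-- split once and fired at most once.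

-- shared rule parser: both Pythons contain the identical lines
--   `antecedente, consecuente = regla.split("=>")` + two `.strip()` calls
def pvSplitRule (regla : String) : Option (String × String) :=
  match PySem.Str.split? regla "=>" with
  | some (a :: c :: _) => some (PySem.Str.strip a, PySem.Str.strip c)
  | _ => none

-- ===== PORT A =====
-- one iteration of A's inner `for regla in bc` loop of the while-loop
-- (state: hechos, cambiando)
def pvStepA (st : PySem.Set String × Bool) (regla : String) : PySem.Set String × Bool :=
  if PySem.Str.isIn "=>" regla then
    match pvSplitRule regla with
    | some (a, c) =>
      if PySem.Set.contains st.1 a && !PySem.Set.contains st.1 c then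
        (PySem.Set.add st.1 c, true)
      else st
    | none => st
  else st

-- A's `while cambiando` loop; the fuel only makes it total (bc.length + 1 passes
-- always suffice, proved below), it never changes the computed set
def pvLoopA (bc : List String) : Nat → PySem.Set String → PySem.Set String
  | 0, h => h
  | fuel+1, h =>
    let st := bc.foldl pvStepA (h, false)
    if st.2 then pvLoopA bc fuel st.1 else st.1

def evaluar_bc (bc : List String) (proposicion : String) : Bool :=
  let hechos := bc.foldl
    (fun h regla => if !PySem.Str.isIn "=>" regla then PySem.Set.add h regla else h)
    PySem.Set.empty
  PySem.Set.contains (pvLoopA bc (bc.length + 1) hechos) proposicion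

-- ===== PORT B =====
-- B's single build loop over bc; state = (adj, alcanzados, pila).
-- The Python stack (append/pop at the END) is represented REVERSED: cons = push, head = pop.
def pvBuildB (st : PySem.Dict String (List String) × PySem.Set String × List String)
    (regla : String) : PySem.Dict String (List String) × PySem.Set String × List String :=
  if PySem.Str.isIn "=>" regla then
    match pvSplitRule regla with
    | some (a, c) => (st.1.modify a [] (· ++ [c]), st.2.1, st.2.2)
    | none => st
  else if PySem.Set.contains st.2.1 regla then st
  else (st.1, PySem.Set.add st.2.1 regla, regla :: st.2.2)

-- B's inner `for y in adj.get(x, [])` loop; state = (alcanzados, pila)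
def pvStepB (s : PySem.Set String × List String) (y : String) :
    PySem.Set String × List String :=
  if !PySem.Set.contains s.1 y then (PySem.Set.add s.1 y, y :: s.2) else s

-- B's `while pila` loop; the fuel only makes it total (3·|bc|+1 pops always suffice,
-- proved below)
def pvLoopB (adj : PySem.Dict String (List String)) :
    Nat → PySem.Set String → List String → PySem.Set String
  | 0, seen, _ => seen
  | _+1, seen, [] => seen
  | fuel+1, seen, x :: stk =>
    let st := (adj.getD x []).foldl pvStepB (seen, stk)
    pvLoopB adj fuel st.1 st.2

def evaluar_bc_alt (bc : List String) (proposicion : String) : Bool :=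
  let st := bc.foldl pvBuildB (PySem.Dict.empty, PySem.Set.empty, [])
  PySem.Set.contains (pvLoopB st.1 (3 * bc.length + 1) st.2.1 st.2.2) proposicion

-- ===== PRECONDITION & SPEC =====
-- Pre_ excludes knowledge bases with a rule containing "=>" two or more times: there
-- Python's two-variable unpacking `antecedente, consecuente = regla.split("=>")`
-- raises ValueError (in A and in B alike).
def Pre_evaluar_bc (bc : List String) (proposicion : String) : Prop :=
  ∀ regla ∈ bc, PySem.Str.count regla "=>" ≤ 1
instance (bc : List String) (proposicion : String) : Decidable (Pre_evaluar_bc bc proposicion) := by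
  unfold Pre_evaluar_bc; infer_instance

def pvWitness_evaluar_bc : List String × String :=
  (["llueve", "llueve => suelo_mojado"], "suelo_mojado")

def Spec_evaluar_bc (bc : List String) (proposicion : String) (out : Bool) : Prop := out = evaluar_bc_alt bc proposicion
instance (bc : List String) (proposicion : String) (out : Bool) : Decidable (Spec_evaluar_bc bc proposicion out) := by unfold Spec_evaluar_bc; infer_instance

-- ===== CLAIM (what is proved, stated in full; the proofs are below) =====
def Claim_equal_evaluar_bc : Prop := ∀ (bc : List String) (proposicion : String), Dom_evaluar_bc bc proposicion → Pre_evaluar_bc bc proposicion → Spec_evaluar_bc bc proposicion (evaluar_bc bc proposicion)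

-- ===== LEMMAS AND PROOFS =====

-- the rule relation both programs derive with: `r` splits into antecedent a, consequent c
def pvRel (bc : List String) (a c : String) : Prop :=
  ∃ r ∈ bc, PySem.Str.isIn "=>" r = true ∧ pvSplitRule r = some (a, c)

-- the initial facts (lines without "=>") and the universe of derivable strings
def pvFacts (bc : List String) : List String :=
  bc.filter (fun r => !PySem.Str.isIn "=>" r)

def pvCons (bc : List String) : List String :=
  bc.filterMap (fun r => if PySem.Str.isIn "=>" r then (pvSplitRule r).map (·.2) else none)

def pvU (bc : List String) : List String := pvFacts bc ++ pvCons bc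

lemma pvU_len (bc : List String) : (pvU bc).length ≤ bc.length := by
  induction bc with
  | nil => simp [pvU, pvFacts, pvCons]
  | cons r bc ih =>
    simp only [pvU, pvFacts, pvCons, List.filter_cons, List.filterMap_cons,
      List.length_append] at ih ⊢
    cases hr : PySem.Str.isIn "=>" r with
    | false =>
      simp only [Bool.not_false, if_true, Bool.false_eq_true, if_false, List.length_cons]
      omega
    | true =>
      simp only [Bool.not_true, Bool.false_eq_true, if_false, if_true]
      cases h2 : pvSplitRule r with
      | none => simp only [Option.map_none, List.length_cons]; omega
      | some p => simp only [Option.map_some, List.length_cons]; omega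

lemma pvRel_cons {r : String} {bc : List String} {a c : String}
    (h : pvRel bc a c) : pvRel (r :: bc) a c := by
  obtain ⟨s, hs, h1, h2⟩ := h; exact ⟨s, List.mem_cons_of_mem _ hs, h1, h2⟩

lemma pvRel_mem_pvCons {bc : List String} {a c : String} (h : pvRel bc a c) :
    c ∈ pvCons bc := by
  obtain ⟨r, hr, h1, h2⟩ := h
  simp only [pvCons, List.mem_filterMap]
  exact ⟨r, hr, by rw [h1, if_pos rfl, h2]; rfl⟩

lemma pvNodupSubLen {l1 l2 : List String} (h : l1.Nodup) (hs : ∀ x ∈ l1, x ∈ l2) :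
    l1.length ≤ l2.length := by
  have h1 : l1.toFinset.card = l1.length := List.toFinset_card_of_nodup h
  have h2 : l1.toFinset ⊆ l2.toFinset := by
    intro x hx
    exact List.mem_toFinset.mpr (hs x (List.mem_toFinset.mp hx))
  have h3 := Finset.card_le_card h2
  have h4 := l2.toFinset_card_le
  omega

-- a fired step of A's pass, and the case analysis of one step
lemma stepA_fire {s : PySem.Set String} {b : Bool} {r a c : String}
    (h1 : PySem.Str.isIn "=>" r = true) (h2 : pvSplitRule r = some (a, c))
    (ha : a ∈ s) (hc : c ∉ s) : pvStepA (s, b) r = (s ++ [c], true) := by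
  have hcond : (PySem.Set.contains s a && !PySem.Set.contains s c) = true := by
    have h3 : PySem.Set.contains s a = true := (PySem.Set.contains_iff s a).mpr ha
    have h4 : PySem.Set.contains s c = false := by
      rw [← Bool.not_eq_true]
      exact fun hh => hc ((PySem.Set.contains_iff s c).mp hh)
    rw [h3, h4]; rfl
  unfold pvStepA
  rw [if_pos h1, h2]
  show (if (PySem.Set.contains s a && !PySem.Set.contains s c) = true
    then (PySem.Set.add s c, true) else (s, b)) = _
  rw [if_pos hcond, PySem.Set.add_of_not_mem hc]

lemma stepA_cases (s : PySem.Set String) (b : Bool) (r : String) :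
    pvStepA (s, b) r = (s, b) ∨
    ∃ a c, PySem.Str.isIn "=>" r = true ∧ pvSplitRule r = some (a, c) ∧ a ∈ s ∧ c ∉ s ∧
      pvStepA (s, b) r = (s ++ [c], true) := by
  by_cases h1 : PySem.Str.isIn "=>" r = true
  · cases h2 : pvSplitRule r with
    | none => left; unfold pvStepA; rw [if_pos h1, h2]
    | some p =>
      obtain ⟨a, c⟩ := p
      by_cases ha : a ∈ s
      · by_cases hc : c ∈ s
        · left
          have hcond : (PySem.Set.contains s a && !PySem.Set.contains s c) = false := by
            rw [(PySem.Set.contains_iff s c).mpr hc]; simp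
          unfold pvStepA
          rw [if_pos h1, h2]
          show (if (PySem.Set.contains s a && !PySem.Set.contains s c) = true
            then (PySem.Set.add s c, true) else (s, b)) = _
          rw [if_neg (by rw [hcond]; simp)]
        · exact Or.inr ⟨a, c, h1, rfl, ha, hc, stepA_fire h1 h2 ha hc⟩
      · left
        have hcond : (PySem.Set.contains s a && !PySem.Set.contains s c) = false := by
          have h4 : PySem.Set.contains s a = false := by
            rw [← Bool.not_eq_true]
            exact fun hh => ha ((PySem.Set.contains_iff s a).mp hh)
          rw [h4]; rfl
        unfold pvStepA
        rw [if_pos h1, h2]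
        show (if (PySem.Set.contains s a && !PySem.Set.contains s c) = true
          then (PySem.Set.add s c, true) else (s, b)) = _
        rw [if_neg (by rw [hcond]; simp)]
  · left; unfold pvStepA; rw [if_neg h1]

-- ---------- A-side: one pass ----------

lemma passA_prefix (bc : List String) (s : PySem.Set String) (b : Bool) :
    ∃ t, (bc.foldl pvStepA (s, b)).1 = s ++ t := by
  induction bc generalizing s b with
  | nil => exact ⟨[], by simp⟩
  | cons r bc ih =>
    rcases stepA_cases s b r with h | ⟨a, c, _, _, _, _, h⟩ <;>
      simp only [List.foldl_cons, h]
    · exact ih s b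
    · obtain ⟨t, ht⟩ := ih (s ++ [c]) true
      exact ⟨[c] ++ t, by rw [ht, List.append_assoc]⟩

lemma passA_nodup (bc : List String) (s : PySem.Set String) (b : Bool)
    (h : s.Nodup) : (bc.foldl pvStepA (s, b)).1.Nodup := by
  induction bc generalizing s b with
  | nil => exact h
  | cons r bc ih =>
    rcases stepA_cases s b r with hst | ⟨a, c, _, _, _, hc, hst⟩ <;>
      simp only [List.foldl_cons, hst]
    · exact ih s b h
    · refine ih (s ++ [c]) true ?_
      rw [← PySem.Set.add_of_not_mem hc]
      exact PySem.Set.nodup_add s c h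

lemma passA_flag_false (bc : List String) (s : PySem.Set String) (b : Bool)
    (h : (bc.foldl pvStepA (s, b)).2 = false) :
    b = false ∧ (bc.foldl pvStepA (s, b)).1 = s := by
  induction bc generalizing s b with
  | nil => exact ⟨h, rfl⟩
  | cons r bc ih =>
    simp only [List.foldl_cons] at h ⊢
    rcases stepA_cases s b r with hst | ⟨a, c, _, _, _, _, hst⟩ <;> rw [hst] at h ⊢
    · exact ih s b h
    · exact absurd (ih (s ++ [c]) true h).1 (by simp)

lemma passA_closed (bc : List String) (s : PySem.Set String)
    (h : (bc.foldl pvStepA (s, false)).2 = false) :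
    ∀ a c, pvRel bc a c → a ∈ s → c ∈ s := by
  induction bc generalizing s with
  | nil => rintro a c ⟨r, hr, -⟩ -; exact absurd hr (List.not_mem_nil)
  | cons r bc ih =>
    simp only [List.foldl_cons] at h
    rcases stepA_cases s false r with hst | ⟨a, c, _, _, _, _, hst⟩ <;> rw [hst] at h
    · rintro a c ⟨r0, hr0, h1, h2⟩ ha
      rcases List.mem_cons.mp hr0 with rfl | hr0
      · by_contra hc
        have := stepA_fire (b := false) h1 h2 ha hc
        rw [this] at hst
        have : s ++ [c] = s := congrArg Prod.fst hst
        simpa using congrArg List.length this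
      · exact ih s h a c ⟨r0, hr0, h1, h2⟩ ha
    · exact absurd (passA_flag_false bc (s ++ [c]) true h).1 (by simp)

lemma passA_sound (bc : List String) (T : String → Prop) (s : PySem.Set String) (b : Bool)
    (hs : ∀ x ∈ s, T x) (hT : ∀ a c, pvRel bc a c → T a → T c) :
    ∀ x ∈ (bc.foldl pvStepA (s, b)).1, T x := by
  induction bc generalizing s b with
  | nil => exact hs
  | cons r bc ih =>
    have hT' : ∀ a c, pvRel bc a c → T a → T c := fun a c hrel => hT a c (pvRel_cons hrel)
    rcases stepA_cases s b r with hst | ⟨a, c, h1, h2, ha, _, hst⟩ <;>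
      simp only [List.foldl_cons, hst]
    · exact ih s b hs hT'
    · refine ih (s ++ [c]) true ?_ hT'
      intro x hx
      rcases List.mem_append.mp hx with hx | hx
      · exact hs x hx
      · have hx : x = c := by simpa using hx
        subst hx
        exact hT a x ⟨r, List.mem_cons_self, h1, h2⟩ (hs a ha)

lemma passA_grow (bc : List String) (s : PySem.Set String)
    (h : (bc.foldl pvStepA (s, false)).2 = true) :
    s.length < (bc.foldl pvStepA (s, false)).1.length := by
  induction bc generalizing s with
  | nil => simp at h
  | cons r bc ih =>
    simp only [List.foldl_cons] at h ⊢
    rcases stepA_cases s false r with hst | ⟨a, c, _, _, _, _, hst⟩ <;> rw [hst] at h ⊢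
    · exact ih s h
    · obtain ⟨t, ht⟩ := passA_prefix bc (s ++ [c]) true
      rw [ht]
      simp [List.length_append]

-- ---------- A-side: the while loop ----------

lemma loopA_eq (bc : List String) (fuel : Nat) (h : PySem.Set String) :
    pvLoopA bc (fuel + 1) h =
      if (bc.foldl pvStepA (h, false)).2 then pvLoopA bc fuel (bc.foldl pvStepA (h, false)).1
      else (bc.foldl pvStepA (h, false)).1 := rfl

lemma loopA_mono (bc : List String) (fuel : Nat) (h : PySem.Set String) :
    ∀ x ∈ h, x ∈ pvLoopA bc fuel h := by
  induction fuel generalizing h with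
  | zero => intro x hx; exact hx
  | succ fuel ih =>
    intro x hx
    rw [loopA_eq]
    obtain ⟨t, ht⟩ := passA_prefix bc h false
    have hx' : x ∈ (bc.foldl pvStepA (h, false)).1 := by
      rw [ht]; exact List.mem_append_left _ hx
    split_ifs with hfl
    · exact ih _ x hx'
    · exact hx' 

lemma loopA_sound (bc : List String) (T : String → Prop) (fuel : Nat) (h : PySem.Set String)
    (hs : ∀ x ∈ h, T x) (hT : ∀ a c, pvRel bc a c → T a → T c) :
    ∀ x ∈ pvLoopA bc fuel h, T x := by
  induction fuel generalizing h with
  | zero => exact hs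
  | succ fuel ih =>
    rw [loopA_eq]
    have hp := passA_sound bc T h false hs hT
    split_ifs with hfl
    · exact ih _ hp
    · exact hp

lemma loopA_closed (bc : List String) (fuel : Nat) (h : PySem.Set String)
    (hnd : h.Nodup) (hU : ∀ x ∈ h, x ∈ pvU bc)
    (hfuel : (pvU bc).length + 1 ≤ fuel + h.length) :
    ∀ a c, pvRel bc a c → a ∈ pvLoopA bc fuel h → c ∈ pvLoopA bc fuel h := by
  induction fuel generalizing h with
  | zero =>
    have := pvNodupSubLen hnd hU
    omega
  | succ fuel ih =>
    rw [loopA_eq]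
    split_ifs with hfl
    · refine ih _ (passA_nodup bc h false hnd) ?_ ?_
      · exact passA_sound bc (· ∈ pvU bc) h false hU
          (fun a c hrel _ => List.mem_append_right _ (pvRel_mem_pvCons hrel))
      · have := passA_grow bc h hfl
        omega
    · have hff := passA_flag_false bc h false (Bool.eq_false_iff.mpr hfl)
      rw [hff.2]
      exact passA_closed bc h (Bool.eq_false_iff.mpr hfl)

-- ---------- B-side: the build loop ----------

lemma pvRel_cons_iff (r : String) (bc : List String) (x y : String) :
    pvRel (r :: bc) x y ↔
      (PySem.Str.isIn "=>" r = true ∧ pvSplitRule r = some (x, y)) ∨ pvRel bc x y := by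
  constructor
  · rintro ⟨r0, hr0, h1, h2⟩
    rcases List.mem_cons.mp hr0 with rfl | hr0
    · exact Or.inl ⟨h1, h2⟩
    · exact Or.inr ⟨r0, hr0, h1, h2⟩
  · rintro (⟨h1, h2⟩ | h)
    · exact ⟨r, List.mem_cons_self, h1, h2⟩
    · exact pvRel_cons h

-- the four shapes of one step of B's build loop
lemma buildB_rule {adj : PySem.Dict String (List String)} {seen : PySem.Set String}
    {stk : List String} {r a c : String}
    (h1 : PySem.Str.isIn "=>" r = true) (h2 : pvSplitRule r = some (a, c)) :
    pvBuildB (adj, seen, stk) r = (adj.modify a [] (· ++ [c]), seen, stk) := by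
  unfold pvBuildB; rw [if_pos h1, h2]

lemma buildB_badrule {adj : PySem.Dict String (List String)} {seen : PySem.Set String}
    {stk : List String} {r : String}
    (h1 : PySem.Str.isIn "=>" r = true) (h2 : pvSplitRule r = none) :
    pvBuildB (adj, seen, stk) r = (adj, seen, stk) := by
  unfold pvBuildB; rw [if_pos h1, h2]

lemma buildB_fact_old {adj : PySem.Dict String (List String)} {seen : PySem.Set String}
    {stk : List String} {r : String}
    (h1 : PySem.Str.isIn "=>" r = false) (h3 : r ∈ seen) :
    pvBuildB (adj, seen, stk) r = (adj, seen, stk) := by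
  unfold pvBuildB
  rw [if_neg (fun hh => Bool.false_ne_true (h1.symm.trans hh)),
    if_pos ((PySem.Set.contains_iff seen r).mpr h3)]

lemma buildB_fact_new {adj : PySem.Dict String (List String)} {seen : PySem.Set String}
    {stk : List String} {r : String}
    (h1 : PySem.Str.isIn "=>" r = false) (h3 : r ∉ seen) :
    pvBuildB (adj, seen, stk) r = (adj, PySem.Set.add seen r, r :: stk) := by
  unfold pvBuildB
  rw [if_neg (fun hh => Bool.false_ne_true (h1.symm.trans hh)),
    if_neg (fun hh => h3 ((PySem.Set.contains_iff seen r).mp hh))]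

lemma buildB_adj (bc : List String) (adj : PySem.Dict String (List String))
    (seen : PySem.Set String) (stk : List String) (x y : String) :
    y ∈ (bc.foldl pvBuildB (adj, seen, stk)).1.getD x [] ↔
      y ∈ adj.getD x [] ∨ pvRel bc x y := by
  induction bc generalizing adj seen stk with
  | nil => simp [pvRel]
  | cons r bc ih =>
    rw [pvRel_cons_iff]
    by_cases h1 : PySem.Str.isIn "=>" r = true
    · cases h2 : pvSplitRule r with
      | none =>
        rw [List.foldl_cons, buildB_badrule h1 h2, ih]
        simp
      | some p =>
        obtain ⟨a, c⟩ := p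
        rw [List.foldl_cons, buildB_rule h1 h2, ih, PySem.Dict.getD_modify]
        by_cases hxa : x = a
        · subst hxa
          rw [if_pos rfl]
          simp only [List.mem_append, List.mem_singleton, h1, true_and,
            Option.some.injEq, Prod.mk.injEq]
          simp only [eq_comm (a := y) (b := c)]
          tauto
        · simp only [if_neg hxa, h1, true_and, Option.some.injEq, Prod.mk.injEq]
          have : ¬(a = x ∧ c = y) := fun hh => hxa hh.1.symm
          tauto
    · have h1' : PySem.Str.isIn "=>" r = false := Bool.eq_false_iff.mpr h1
      have hno : ∀ q : Prop, (PySem.Str.isIn "=>" r = true ∧ q) ∨ pvRel bc x y ↔ pvRel bc x y := by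
        intro q
        constructor
        · rintro (⟨hh, -⟩ | h); exact absurd hh h1; exact h
        · exact Or.inr
      rw [hno]
      by_cases h3 : r ∈ seen
      · rw [List.foldl_cons, buildB_fact_old h1' h3, ih]
      · rw [List.foldl_cons, buildB_fact_new h1' h3, ih]

lemma buildB_seen (bc : List String) (adj : PySem.Dict String (List String))
    (seen : PySem.Set String) (stk : List String) (z : String) :
    z ∈ (bc.foldl pvBuildB (adj, seen, stk)).2.1 ↔
      z ∈ seen ∨ (z ∈ bc ∧ PySem.Str.isIn "=>" z = false) := by
  induction bc generalizing adj seen stk with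
  | nil => simp
  | cons r bc ih =>
    by_cases h1 : PySem.Str.isIn "=>" r = true
    · cases h2 : pvSplitRule r with
      | none =>
        rw [List.foldl_cons, buildB_badrule h1 h2, ih]
        simp only [List.mem_cons]
        constructor
        · rintro (hz | ⟨hm, hf⟩)
          · exact Or.inl hz
          · exact Or.inr ⟨Or.inr hm, hf⟩
        · rintro (hz | ⟨rfl | hm, hf⟩)
          · exact Or.inl hz
          · exact absurd h1 (by rw [hf]; simp)
          · exact Or.inr ⟨hm, hf⟩
      | some p =>
        obtain ⟨a, c⟩ := p
        rw [List.foldl_cons, buildB_rule h1 h2, ih]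
        simp only [List.mem_cons]
        constructor
        · rintro (hz | ⟨hm, hf⟩)
          · exact Or.inl hz
          · exact Or.inr ⟨Or.inr hm, hf⟩
        · rintro (hz | ⟨rfl | hm, hf⟩)
          · exact Or.inl hz
          · exact absurd h1 (by rw [hf]; simp)
          · exact Or.inr ⟨hm, hf⟩
    · have h1' : PySem.Str.isIn "=>" r = false := Bool.eq_false_iff.mpr h1
      by_cases h3 : r ∈ seen
      · rw [List.foldl_cons, buildB_fact_old h1' h3, ih]
        simp only [List.mem_cons]
        constructor
        · rintro (hz | ⟨hm, hf⟩)
          · exact Or.inl hz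
          · exact Or.inr ⟨Or.inr hm, hf⟩
        · rintro (hz | ⟨rfl | hm, hf⟩)
          · exact Or.inl hz
          · exact Or.inl h3
          · exact Or.inr ⟨hm, hf⟩
      · rw [List.foldl_cons, buildB_fact_new h1' h3, ih]
        simp only [List.mem_cons, PySem.Set.mem_add]
        constructor
        · rintro ((hz | rfl) | ⟨hm, hf⟩)
          · exact Or.inl hz
          · exact Or.inr ⟨Or.inl rfl, h1'⟩
          · exact Or.inr ⟨Or.inr hm, hf⟩
        · rintro (hz | ⟨rfl | hm, hf⟩)
          · exact Or.inl (Or.inl hz)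
          · exact Or.inl (Or.inr rfl)
          · exact Or.inr ⟨hm, hf⟩

lemma buildB_nodup (bc : List String) (adj : PySem.Dict String (List String))
    (seen : PySem.Set String) (stk : List String) (h : seen.Nodup) :
    (bc.foldl pvBuildB (adj, seen, stk)).2.1.Nodup := by
  induction bc generalizing adj seen stk with
  | nil => exact h
  | cons r bc ih =>
    by_cases h1 : PySem.Str.isIn "=>" r = true
    · cases h2 : pvSplitRule r with
      | none => rw [List.foldl_cons, buildB_badrule h1 h2]; exact ih _ _ _ h
      | some p =>
        obtain ⟨a, c⟩ := p
        rw [List.foldl_cons, buildB_rule h1 h2]; exact ih _ _ _ h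
    · have h1' : PySem.Str.isIn "=>" r = false := Bool.eq_false_iff.mpr h1
      by_cases h3 : r ∈ seen
      · rw [List.foldl_cons, buildB_fact_old h1' h3]; exact ih _ _ _ h
      · rw [List.foldl_cons, buildB_fact_new h1' h3]
        exact ih _ _ _ (PySem.Set.nodup_add seen r h)

lemma buildB_stack_seen (bc : List String) (adj : PySem.Dict String (List String))
    (seen : PySem.Set String) (stk : List String) (h : ∀ z ∈ stk, z ∈ seen) :
    ∀ z ∈ (bc.foldl pvBuildB (adj, seen, stk)).2.2, z ∈ (bc.foldl pvBuildB (adj, seen, stk)).2.1 := by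
  induction bc generalizing adj seen stk with
  | nil => exact h
  | cons r bc ih =>
    by_cases h1 : PySem.Str.isIn "=>" r = true
    · cases h2 : pvSplitRule r with
      | none => rw [List.foldl_cons, buildB_badrule h1 h2]; exact ih _ _ _ h
      | some p =>
        obtain ⟨a, c⟩ := p
        rw [List.foldl_cons, buildB_rule h1 h2]; exact ih _ _ _ h
    · have h1' : PySem.Str.isIn "=>" r = false := Bool.eq_false_iff.mpr h1
      by_cases h3 : r ∈ seen
      · rw [List.foldl_cons, buildB_fact_old h1' h3]; exact ih _ _ _ h
      · rw [List.foldl_cons, buildB_fact_new h1' h3]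
        refine ih _ _ _ ?_
        intro z hz
        rcases List.mem_cons.mp hz with rfl | hz
        · exact (PySem.Set.mem_add seen z z).mpr (Or.inr rfl)
        · exact (PySem.Set.mem_add seen r z).mpr (Or.inl (h z hz))

lemma buildB_seen_stack (bc : List String) (adj : PySem.Dict String (List String))
    (seen : PySem.Set String) (stk : List String) (h : ∀ z ∈ seen, z ∈ stk) :
    ∀ z ∈ (bc.foldl pvBuildB (adj, seen, stk)).2.1, z ∈ (bc.foldl pvBuildB (adj, seen, stk)).2.2 := by
  induction bc generalizing adj seen stk with
  | nil => exact h
  | cons r bc ih =>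
    by_cases h1 : PySem.Str.isIn "=>" r = true
    · cases h2 : pvSplitRule r with
      | none => rw [List.foldl_cons, buildB_badrule h1 h2]; exact ih _ _ _ h
      | some p =>
        obtain ⟨a, c⟩ := p
        rw [List.foldl_cons, buildB_rule h1 h2]; exact ih _ _ _ h
    · have h1' : PySem.Str.isIn "=>" r = false := Bool.eq_false_iff.mpr h1
      by_cases h3 : r ∈ seen
      · rw [List.foldl_cons, buildB_fact_old h1' h3]; exact ih _ _ _ h
      · rw [List.foldl_cons, buildB_fact_new h1' h3]
        refine ih _ _ _ ?_
        intro z hz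
        rcases (PySem.Set.mem_add seen r z).mp hz with hz | rfl
        · exact List.mem_cons_of_mem r (h z hz)
        · exact List.mem_cons_self

lemma buildB_stack_len (bc : List String) (adj : PySem.Dict String (List String))
    (seen : PySem.Set String) (stk : List String) :
    (bc.foldl pvBuildB (adj, seen, stk)).2.2.length ≤ stk.length + bc.length := by
  induction bc generalizing adj seen stk with
  | nil => simp
  | cons r bc ih =>
    simp only [List.length_cons]
    by_cases h1 : PySem.Str.isIn "=>" r = true
    · cases h2 : pvSplitRule r with
      | none =>
        rw [List.foldl_cons, buildB_badrule h1 h2]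
        have := ih adj seen stk; omega
      | some p =>
        obtain ⟨a, c⟩ := p
        rw [List.foldl_cons, buildB_rule h1 h2]
        have := ih (adj.modify a [] (· ++ [c])) seen stk; omega
    · have h1' : PySem.Str.isIn "=>" r = false := Bool.eq_false_iff.mpr h1
      by_cases h3 : r ∈ seen
      · rw [List.foldl_cons, buildB_fact_old h1' h3]
        have := ih adj seen stk; omega
      · rw [List.foldl_cons, buildB_fact_new h1' h3]
        have := ih adj (PySem.Set.add seen r) (r :: stk)
        simp only [List.length_cons] at this; omega

-- ---------- B-side: the inner successor loop ----------

-- the two shapes of one step of B's inner loop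
lemma stepB_old {s : PySem.Set String} {st : List String} {y : String} (hy : y ∈ s) :
    pvStepB (s, st) y = (s, st) := by
  unfold pvStepB
  rw [(PySem.Set.contains_iff s y).mpr hy]
  rfl

lemma stepB_new {s : PySem.Set String} {st : List String} {y : String} (hy : y ∉ s) :
    pvStepB (s, st) y = (PySem.Set.add s y, y :: st) := by
  unfold pvStepB
  rw [Bool.eq_false_iff.mpr (fun hh => hy ((PySem.Set.contains_iff s y).mp hh))]
  rfl

lemma innerB_mem (ys : List String) (s : PySem.Set String) (st : List String) (z : String) :
    z ∈ (ys.foldl pvStepB (s, st)).1 ↔ z ∈ s ∨ z ∈ ys := by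
  induction ys generalizing s st with
  | nil => simp
  | cons y ys ih =>
    by_cases hy : y ∈ s
    · rw [List.foldl_cons, stepB_old hy, ih]
      simp only [List.mem_cons]
      constructor
      · rintro (hz | hz)
        · exact Or.inl hz
        · exact Or.inr (Or.inr hz)
      · rintro (hz | rfl | hz)
        · exact Or.inl hz
        · exact Or.inl hy
        · exact Or.inr hz
    · rw [List.foldl_cons, stepB_new hy, ih]
      simp only [List.mem_cons, PySem.Set.mem_add]
      tauto

lemma innerB_nodup (ys : List String) (s : PySem.Set String) (st : List String)
    (h : s.Nodup) : (ys.foldl pvStepB (s, st)).1.Nodup := by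
  induction ys generalizing s st with
  | nil => exact h
  | cons y ys ih =>
    by_cases hy : y ∈ s
    · rw [List.foldl_cons, stepB_old hy]; exact ih _ _ h
    · rw [List.foldl_cons, stepB_new hy]; exact ih _ _ (PySem.Set.nodup_add s y h)

lemma innerB_stack (ys : List String) (s : PySem.Set String) (st : List String) :
    ∃ pre, (ys.foldl pvStepB (s, st)).2 = pre ++ st ∧ ∀ z ∈ pre, z ∈ ys := by
  induction ys generalizing s st with
  | nil => exact ⟨[], rfl, by simp⟩
  | cons y ys ih =>
    by_cases hy : y ∈ s
    · rw [List.foldl_cons, stepB_old hy]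
      obtain ⟨pre, hpre, hmem⟩ := ih s st
      exact ⟨pre, hpre, fun z hz => List.mem_cons_of_mem y (hmem z hz)⟩
    · rw [List.foldl_cons, stepB_new hy]
      obtain ⟨pre, hpre, hmem⟩ := ih (PySem.Set.add s y) (y :: st)
      refine ⟨pre ++ [y], by rw [hpre]; simp, ?_⟩
      intro z hz
      rcases List.mem_append.mp hz with hz | hz
      · exact List.mem_cons_of_mem y (hmem z hz)
      · rw [List.mem_singleton.mp hz]; exact List.mem_cons_self

lemma innerB_stack_seen (ys : List String) (s : PySem.Set String) (st : List String)
    (h : ∀ z ∈ st, z ∈ s) :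
    ∀ z ∈ (ys.foldl pvStepB (s, st)).2, z ∈ (ys.foldl pvStepB (s, st)).1 := by
  induction ys generalizing s st with
  | nil => exact h
  | cons y ys ih =>
    by_cases hy : y ∈ s
    · rw [List.foldl_cons, stepB_old hy]; exact ih s st h
    · rw [List.foldl_cons, stepB_new hy]
      refine ih _ _ ?_
      intro z hz
      rcases List.mem_cons.mp hz with rfl | hz
      · exact (PySem.Set.mem_add s z z).mpr (Or.inr rfl)
      · exact (PySem.Set.mem_add s y z).mpr (Or.inl (h z hz))

lemma innerB_len (ys : List String) (s : PySem.Set String) (st : List String) :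
    (ys.foldl pvStepB (s, st)).1.length + st.length
      = s.length + (ys.foldl pvStepB (s, st)).2.length := by
  induction ys generalizing s st with
  | nil => rfl
  | cons y ys ih =>
    by_cases hy : y ∈ s
    · rw [List.foldl_cons, stepB_old hy]; exact ih s st
    · rw [List.foldl_cons, stepB_new hy]
      have h1 := ih (PySem.Set.add s y) (y :: st)
      have h2 : (PySem.Set.add s y).length = s.length + 1 := by
        rw [PySem.Set.add_of_not_mem hy, List.length_append, List.length_singleton]
      simp only [List.length_cons] at h1
      omega

lemma innerB_new_pushed (ys : List String) (s : PySem.Set String) (st : List String) :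
    ∀ z ∈ (ys.foldl pvStepB (s, st)).1, z ∉ s → z ∈ (ys.foldl pvStepB (s, st)).2 := by
  induction ys generalizing s st with
  | nil => intro z hz hzs; exact absurd hz hzs
  | cons y ys ih =>
    by_cases hy : y ∈ s
    · rw [List.foldl_cons, stepB_old hy]; exact ih s st
    · rw [List.foldl_cons, stepB_new hy]
      intro z hz hzs
      by_cases hz' : z ∈ PySem.Set.add s y
      · rcases (PySem.Set.mem_add s y z).mp hz' with hz' | rfl
        · exact absurd hz' hzs
        · obtain ⟨pre, hpre, -⟩ := innerB_stack ys (PySem.Set.add s z) (z :: st)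
          rw [hpre]
          exact List.mem_append_right pre List.mem_cons_self
      · exact ih _ _ z hz hz' 

-- ---------- B-side: the worklist loop ----------

lemma loopB_eq (adj : PySem.Dict String (List String)) (fuel : Nat)
    (seen : PySem.Set String) (x : String) (stk : List String) :
    pvLoopB adj (fuel + 1) seen (x :: stk) =
      pvLoopB adj fuel ((adj.getD x []).foldl pvStepB (seen, stk)).1
        ((adj.getD x []).foldl pvStepB (seen, stk)).2 := rfl

lemma loopB_sound (adj : PySem.Dict String (List String)) (T : String → Prop) (fuel : Nat)
    (seen : PySem.Set String) (stk : List String)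
    (hs : ∀ z ∈ seen, T z) (hT : ∀ x y, y ∈ adj.getD x [] → T x → T y)
    (hstk : ∀ z ∈ stk, z ∈ seen) :
    ∀ z ∈ pvLoopB adj fuel seen stk, T z := by
  induction fuel generalizing seen stk with
  | zero => exact hs
  | succ fuel ih =>
    cases stk with
    | nil => exact hs
    | cons x stk =>
      rw [loopB_eq]
      have hTx : T x := hs x (hstk x List.mem_cons_self)
      refine ih _ _ ?_ ?_
      · intro z hz
        rcases (innerB_mem _ seen stk z).mp hz with hz | hz
        · exact hs z hz
        · exact hT x z hz hTx
      · exact innerB_stack_seen _ seen stk (fun z hz => hstk z (List.mem_cons_of_mem x hz))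

lemma loopB_closed (bc : List String) (adj : PySem.Dict String (List String)) (fuel : Nat)
    (seen : PySem.Set String) (stk : List String)
    (hnd : seen.Nodup) (hU : ∀ z ∈ seen, z ∈ pvU bc)
    (hadj : ∀ x y, y ∈ adj.getD x [] → y ∈ pvU bc)
    (hstk : ∀ z ∈ stk, z ∈ seen)
    (hproc : ∀ z ∈ seen, z ∉ stk → ∀ y ∈ adj.getD z [], y ∈ seen)
    (hfuel : stk.length + 2 * (pvU bc).length + 1 ≤ fuel + 2 * seen.length) :
    (∀ z ∈ seen, z ∈ pvLoopB adj fuel seen stk) ∧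
      (∀ x ∈ pvLoopB adj fuel seen stk, ∀ y ∈ adj.getD x [],
        y ∈ pvLoopB adj fuel seen stk) := by
  induction fuel generalizing seen stk with
  | zero =>
    exfalso
    have := pvNodupSubLen hnd hU
    omega
  | succ fuel ih =>
    cases stk with
    | nil =>
      refine ⟨fun z hz => hz, ?_⟩
      intro x hx y hy
      exact hproc x hx List.not_mem_nil y hy
    | cons x stk =>
      rw [loopB_eq]
      obtain ⟨pre, hpre, hpreys⟩ := innerB_stack (adj.getD x []) seen stk
      have hmem := innerB_mem (adj.getD x []) seen stk
      have hnd' := innerB_nodup (adj.getD x []) seen stk hnd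
      have hss := innerB_stack_seen (adj.getD x []) seen stk
        (fun z hz => hstk z (List.mem_cons_of_mem x hz))
      have hlen := innerB_len (adj.getD x []) seen stk
      have hnp := innerB_new_pushed (adj.getD x []) seen stk
      have hU' : ∀ z ∈ ((adj.getD x []).foldl pvStepB (seen, stk)).1, z ∈ pvU bc := by
        intro z hz
        rcases (hmem z).mp hz with hz | hz
        · exact hU z hz
        · exact hadj x z hz
      have hproc' : ∀ z ∈ ((adj.getD x []).foldl pvStepB (seen, stk)).1,
          z ∉ ((adj.getD x []).foldl pvStepB (seen, stk)).2 →
          ∀ y ∈ adj.getD z [], y ∈ ((adj.getD x []).foldl pvStepB (seen, stk)).1 := by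
        intro z hz hznst y hy
        by_cases hzx : z = x
        · subst hzx
          exact (hmem y).mpr (Or.inr hy)
        · by_cases hzseen : z ∈ seen
          · have hznstk : z ∉ x :: stk := by
              intro hzin
              rcases List.mem_cons.mp hzin with h' | h'
              · exact hzx h'
              · exact hznst (hpre ▸ List.mem_append_right pre h')
            exact (hmem y).mpr (Or.inl (hproc z hzseen hznstk y hy))
          · exact absurd (hnp z hz hzseen) hznst
      have hlen2 : ((adj.getD x []).foldl pvStepB (seen, stk)).2.length ≥ stk.length := by
        rw [hpre, List.length_append]; omega
      have hseenN : seen.length ≤ (pvU bc).length := pvNodupSubLen hnd hU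
      have hfuel' : ((adj.getD x []).foldl pvStepB (seen, stk)).2.length
          + 2 * (pvU bc).length + 1 ≤ fuel
          + 2 * ((adj.getD x []).foldl pvStepB (seen, stk)).1.length := by
        simp only [List.length_cons] at hfuel
        omega
      have hres := ih _ _ hnd' hU' hss hproc' hfuel'
      refine ⟨?_, hres.2⟩
      intro z hz
      exact hres.1 z ((hmem z).mpr (Or.inl hz))

-- ===== VERDICT (by name: the statement is the Claim_ definition above) =====
theorem evaluar_bc_spec : Claim_equal_evaluar_bc := by
  unfold Claim_equal_evaluar_bc
  intro bc p _dom _pre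
  unfold Spec_evaluar_bc evaluar_bc evaluar_bc_alt
  -- A's initial fact set is ofList (pvFacts bc)
  have hF : bc.foldl
      (fun h regla => if !PySem.Str.isIn "=>" regla then PySem.Set.add h regla else h)
      PySem.Set.empty = PySem.Set.ofList (pvFacts bc) := by
    rw [PySem.List.foldl_if_eq_foldl_filter (fun regla => !PySem.Str.isIn "=>" regla)
      PySem.Set.add bc PySem.Set.empty, PySem.Set.ofList_eq_foldl]
    rfl
  simp only [hF]
  set st := bc.foldl pvBuildB (PySem.Dict.empty, PySem.Set.empty, []) with hst
  have hadjc : ∀ x y, y ∈ st.1.getD x [] ↔ pvRel bc x y := by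
    intro x y
    rw [hst, buildB_adj]
    simp [PySem.Dict.getD_empty]
  have hseenc : ∀ z, z ∈ st.2.1 ↔ z ∈ bc ∧ PySem.Str.isIn "=>" z = false := by
    intro z
    rw [hst, buildB_seen]
    simp
  have hseen_nodup : st.2.1.Nodup := by
    rw [hst]; exact buildB_nodup bc _ _ _ List.nodup_nil
  have hstkseen : ∀ z ∈ st.2.2, z ∈ st.2.1 := by
    rw [hst]; exact buildB_stack_seen bc _ _ _ (by simp)
  have hseenstk : ∀ z ∈ st.2.1, z ∈ st.2.2 := by
    rw [hst]; exact buildB_seen_stack bc _ _ _ (by simp)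
  have hstklen : st.2.2.length ≤ bc.length := by
    rw [hst]
    have := buildB_stack_len bc PySem.Dict.empty PySem.Set.empty []
    simpa using this
  have hFactsU : ∀ z, z ∈ bc ∧ PySem.Str.isIn "=>" z = false → z ∈ pvU bc := by
    intro z hz
    exact List.mem_append_left _ (List.mem_filter.mpr ⟨hz.1, by rw [hz.2]; rfl⟩)
  have hFmem : ∀ z, z ∈ PySem.Set.ofList (pvFacts bc) ↔
      (z ∈ bc ∧ PySem.Str.isIn "=>" z = false) := by
    intro z
    rw [PySem.Set.mem_ofList]
    simp [pvFacts, List.mem_filter]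
  have hUlen := pvU_len bc
  -- A's closure properties
  have hAclosed : ∀ a c, pvRel bc a c →
      a ∈ pvLoopA bc (bc.length + 1) (PySem.Set.ofList (pvFacts bc)) →
      c ∈ pvLoopA bc (bc.length + 1) (PySem.Set.ofList (pvFacts bc)) := by
    refine loopA_closed bc _ _ (PySem.Set.nodup_ofList _) ?_ (by omega)
    intro x hx
    exact hFactsU x ((hFmem x).mp hx)
  -- B's closure properties
  have hBprops := loopB_closed bc st.1 (3 * bc.length + 1) st.2.1 st.2.2 hseen_nodup
    (fun z hz => hFactsU z ((hseenc z).mp hz))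
    (fun x y hy => List.mem_append_right _ (pvRel_mem_pvCons ((hadjc x y).mp hy)))
    hstkseen
    (fun z hz hznstk => absurd (hseenstk z hz) hznstk)
    (by omega)
  -- mutual inclusion
  have hAB : ∀ z ∈ pvLoopA bc (bc.length + 1) (PySem.Set.ofList (pvFacts bc)),
      z ∈ pvLoopB st.1 (3 * bc.length + 1) st.2.1 st.2.2 := by
    refine loopA_sound bc _ _ _ ?_ ?_
    · intro x hx
      exact hBprops.1 x ((hseenc x).mpr ((hFmem x).mp hx))
    · intro a c hrel ha
      exact hBprops.2 a ha c ((hadjc a c).mpr hrel)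
  have hBA : ∀ z ∈ pvLoopB st.1 (3 * bc.length + 1) st.2.1 st.2.2,
      z ∈ pvLoopA bc (bc.length + 1) (PySem.Set.ofList (pvFacts bc)) := by
    refine loopB_sound st.1 _ _ _ _ ?_ ?_ hstkseen
    · intro z hz
      exact loopA_mono bc _ _ z ((hFmem z).mpr ((hseenc z).mp hz))
    · intro x y hy hx
      exact hAclosed x y ((hadjc x y).mp hy) hx
  rw [Bool.eq_iff_iff, PySem.Set.contains_iff, PySem.Set.contains_iff]
  exact ⟨hAB p, hBA p⟩
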